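-- pv_equiv track=rewrite | github.com/bbradz/timeTracking | Add2Postgresql.py | fullCounts
-- ===== SOURCE A (Python) =====
-- def fullCounts(data, x):
--     ret = {}
--     for i in x:
--         if i in data.keys():
--             ret[i]= data[i]
--         else:
--             ret[i]=0
--     return ret
-- ===== SOURCE B (Python) =====
-- def fullCounts(data, x):
--     # Seed every key of x with 0 (fromkeys keeps x's order and collapses
--     # duplicates), then overwrite from data for the keys present in both.
--     ret = dict.fromkeys(x, 0)
--     for k in data.keys():
--         if k in ret:
--             ret[k] = data[k]
--     return ret
-- ===== Notes on version B (the rewrite author's own statement) =====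
-- stated objective: alternative
-- what changed: A scans x and probes data per element; B seeds the result with dict.fromkeys(x, 0) and then walks data's keys once, overwriting only the keys present in both, a reversed two-phase traversal.
import Mathlib
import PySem

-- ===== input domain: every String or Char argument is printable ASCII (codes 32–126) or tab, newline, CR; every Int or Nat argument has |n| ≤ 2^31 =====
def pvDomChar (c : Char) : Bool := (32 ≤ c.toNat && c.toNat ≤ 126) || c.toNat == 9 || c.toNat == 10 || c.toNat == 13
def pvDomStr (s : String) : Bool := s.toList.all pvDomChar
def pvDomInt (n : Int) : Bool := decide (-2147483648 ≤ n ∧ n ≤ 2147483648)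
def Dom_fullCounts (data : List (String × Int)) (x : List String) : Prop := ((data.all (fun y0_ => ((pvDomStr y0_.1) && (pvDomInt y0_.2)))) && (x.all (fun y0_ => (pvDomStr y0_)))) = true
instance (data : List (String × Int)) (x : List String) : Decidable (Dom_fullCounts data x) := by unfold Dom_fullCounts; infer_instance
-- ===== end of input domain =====

-- B seeds the result with zeros for x's keys (dict.fromkeys) and then fills it from data's
-- keys, instead of A's per-element probe of data; alternative decomposition, same cost.

-- ===== PORT A =====
-- A's loop: for i in x: ret[i] = data[i] if i in data.keys() else 0
def fullCounts (data : List (String × Int)) (x : List String) : List (String × Int) :=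
  (x.foldl (fun (ret : PySem.Dict String Int) i =>
      if (PySem.Dict.mk data).contains i then
        -- data[i]: guarded by the contains check, so the 0 default is never used
        ret.insert i ((PySem.Dict.mk data).getD i 0)
      else
        ret.insert i 0)
    PySem.Dict.empty).items

-- ===== PORT B =====
-- ret = dict.fromkeys(x, 0); for k in data.keys(): if k in ret: ret[k] = data[k]
def fullCounts_alt (data : List (String × Int)) (x : List String) : List (String × Int) :=
  (((PySem.Dict.mk data).keys).foldl (fun (ret : PySem.Dict String Int) k =>
      if ret.contains k then
        -- data[k]: k comes from data.keys(), so the 0 default is never used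
        ret.insert k ((PySem.Dict.mk data).getD k 0)
      else
        ret)
    (PySem.Dict.mk ((PySem.List.dedup x).map (fun k => (k, (0 : Int)))))).items

-- ===== PRECONDITION & SPEC =====
def Spec_fullCounts (data : List (String × Int)) (x : List String) (out : List (String × Int)) : Prop := out = fullCounts_alt data x
instance (data : List (String × Int)) (x : List String) (out : List (String × Int)) : Decidable (Spec_fullCounts data x out) := by unfold Spec_fullCounts; infer_instance

-- ===== CLAIM (what is proved, stated in full; the proofs are below) =====
def Claim_equal_fullCounts : Prop := ∀ (data : List (String × Int)) (x : List String), Dom_fullCounts data x → Spec_fullCounts data x (fullCounts data x)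

-- ===== LEMMAS AND PROOFS =====

-- A's fold: inserting key-determined values; the final lookup is `w` on keys seen.
theorem pv_foldA_getD (w : String → Int) (j : String) :
    ∀ (x : List String) (r : PySem.Dict String Int),
      (x.foldl (fun r i => r.insert i (w i)) r).getD j 0
        = if j ∈ x then w j else r.getD j 0 := by
  intro x
  induction x with
  | nil => intro r; simp
  | cons i x ih =>
    intro r
    simp only [List.foldl_cons, ih, PySem.Dict.getD_insert, List.mem_cons]
    by_cases hx : j ∈ x
    · simp [hx]
    · by_cases hji : j = i
      · simp [hji]
      · simp [hx, hji]

-- B's fill loop never changes the key list.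
theorem pv_foldB_keys (w : String → Int) :
    ∀ (L : List String) (r : PySem.Dict String Int),
      (L.foldl (fun r k => if r.contains k then r.insert k (w k) else r) r).keys = r.keys := by
  intro L
  induction L with
  | nil => intro r; rfl
  | cons k L ih =>
    intro r
    simp only [List.foldl_cons]
    by_cases h : r.contains k = true
    · simp only [h, if_true, ih, PySem.Dict.keys_insert_of_contains r (w k) h]
    · simp only [Bool.not_eq_true] at h
      simp [h, ih]

-- B's fill loop: final lookup after filling from L.
theorem pv_foldB_getD (w : String → Int) (j : String) :
    ∀ (L : List String) (r : PySem.Dict String Int),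
      (L.foldl (fun r k => if r.contains k then r.insert k (w k) else r) r).getD j 0
        = if j ∈ L ∧ r.contains j = true then w j else r.getD j 0 := by
  intro L
  induction L with
  | nil => intro r; simp
  | cons k L ih =>
    intro r
    simp only [List.foldl_cons]
    by_cases hk : r.contains k = true
    · simp only [hk, if_true, ih, List.mem_cons]
      by_cases hjk : j = k
      · subst hjk
        simp [PySem.Dict.contains_insert_self, hk]
      · have hc : (r.insert k (w k)).contains j = r.contains j := by
          simp [PySem.Dict.contains_insert, hjk]
        simp [hc, hjk, PySem.Dict.getD_insert]
    · simp only [Bool.not_eq_true] at hk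
      simp only [hk, if_false, Bool.false_eq_true, ih, List.mem_cons]
      by_cases hjk : j = k
      · subst hjk; simp [hk]
      · simp [hjk]

-- keys of A's dict: the distinct elements of x in first-occurrence order.
theorem pv_keysA (x : List String) (w : String → Int) :
    (x.foldl (fun (r : PySem.Dict String Int) i => r.insert i (w i)) PySem.Dict.empty).keys
      = PySem.List.dedup x := by
  rw [PySem.Dict.keys_foldl_insert x (fun _ i => w i) PySem.Dict.empty]
  simp [PySem.Dict.keys_empty, PySem.Set.update_nil_left]

-- A's branching step is insertion of a key-determined value.
theorem pv_stepA (data : List (String × Int)) :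
    (fun (ret : PySem.Dict String Int) i =>
        if (PySem.Dict.mk data).contains i then
          ret.insert i ((PySem.Dict.mk data).getD i 0)
        else ret.insert i 0)
      = fun ret i => ret.insert i ((PySem.Dict.mk data).getD i 0) := by
  funext ret i
  by_cases h : (PySem.Dict.mk data).contains i = true
  · simp [h]
  · simp only [Bool.not_eq_true] at h
    rw [PySem.Dict.getD_of_not_contains _ 0 h]; simp [h]

theorem fullCounts_spec_aux (data : List (String × Int)) (x : List String) :
    fullCounts data x = fullCounts_alt data x := by
  unfold fullCounts fullCounts_alt
  rw [pv_stepA data]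
  set D := PySem.Dict.mk data with hD
  set w : String → Int := fun i => D.getD i 0 with hw
  set dA := x.foldl (fun (r : PySem.Dict String Int) i => r.insert i (w i)) PySem.Dict.empty with hdA
  set r0 := PySem.Dict.mk ((PySem.List.dedup x).map (fun k => (k, (0 : Int)))) with hr0
  set dB := (D.keys).foldl (fun (r : PySem.Dict String Int) k =>
      if r.contains k then r.insert k (w k) else r) r0 with hdB
  have hkr0 : r0.keys = PySem.List.dedup x := by
    simp [hr0, PySem.Dict.keys, List.map_map, Function.comp_def]
  have hkA : dA.keys = PySem.List.dedup x := pv_keysA x w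
  have hkB : dB.keys = PySem.List.dedup x := by
    rw [hdB, pv_foldB_keys w D.keys r0, hkr0]
  have hndA : dA.keys.Nodup := by rw [hkA]; exact PySem.List.nodup_dedup x
  have hndB : dB.keys.Nodup := by rw [hkB]; exact PySem.List.nodup_dedup x
  rw [PySem.Dict.items_eq_map_keys dA hndA 0, PySem.Dict.items_eq_map_keys dB hndB 0,
    hkA, hkB]
  apply List.map_congr_left
  intro j hj
  have hjx : j ∈ x := (PySem.List.mem_dedup x j).1 hj
  have hA : dA.getD j 0 = w j := by
    rw [hdA, pv_foldA_getD w j x PySem.Dict.empty]; simp [hjx]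
  have hr0c : r0.contains j = true := by
    rw [PySem.Dict.contains_iff_mem_keys, hkr0]; exact hj
  have hr0g : r0.getD j 0 = 0 := by
    apply PySem.Dict.getD_of_mem_items
    · show (j, (0:Int)) ∈ r0.items
      rw [hr0]
      exact List.mem_map.2 ⟨j, hj, rfl⟩
    · rw [hkr0]; exact PySem.List.nodup_dedup x
  have hB : dB.getD j 0 = w j := by
    rw [hdB, pv_foldB_getD w j D.keys r0]
    by_cases hjD : j ∈ D.keys
    · simp [hjD, hr0c]
    · have hc : D.contains j = false := by
        rw [← Bool.not_eq_true, PySem.Dict.contains_iff_mem_keys]; exact hjD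
      simp only [hjD, false_and, if_false, hr0g, hw]
      rw [PySem.Dict.getD_of_not_contains _ 0 hc]
  rw [hA, hB]

-- ===== VERDICT (by name: the statement is the Claim_ definition above) =====
theorem fullCounts_spec : Claim_equal_fullCounts := by
  intro data x _
  exact fullCounts_spec_aux data x
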